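-- pv_equiv track=rewrite | github.com/DNYoussef/familiar-gm-assistant | src/misplaced/nasa_critical_fixes.py | _check_function_length
-- ===== SOURCE A (Python) =====
-- MAX_FUNCTION_LINES = 60    # Rule 4: Function size limit
--
-- def _check_function_length(code: str) -> bool:
--     """Check function length compliance (NASA Rule 4)."""
--     assert code is not None, "code cannot be None"
--
--     lines = code.split('\n')
--     function_lines = []
--     current_function_lines = 0
--     in_function = False
--
--     for line in lines:
--         if line.strip().startswith('def '):
--             if in_function and current_function_lines > 0:
--                 function_lines.append(current_function_lines)
--             in_function = True
--             current_function_lines = 1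
--         elif in_function:
--             if line.strip() and not line.startswith(' '):
--                 # End of function
--                 function_lines.append(current_function_lines)
--                 in_function = False
--                 current_function_lines = 0
--             else:
--                 current_function_lines += 1
--
--     # Check if any function exceeds limit
--     return all(lines <= MAX_FUNCTION_LINES for lines in function_lines)
-- ===== SOURCE B (Python) =====
-- MAX_FUNCTION_LINES = 60
--
--
-- def _check_function_length(code: str) -> bool:
--     """Check function length compliance (NASA Rule 4) via a boundary-index scan."""
--     lines = code.split('\n')
--     # A boundary is a def line, or a nonempty line not starting with a space.
--     bs = []
--     for i, line in enumerate(lines):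
--         d = line.strip().startswith('def ')
--         if d or (line.strip() and not line.startswith(' ')):
--             bs.append((i, d))
--     # Each def-boundary's function runs to the next boundary; the last one has
--     # no terminator and is not counted.
--     return all((not d) or (j - i <= MAX_FUNCTION_LINES)
--                for (i, d), (j, _) in zip(bs, bs[1:]))
-- ===== Notes on version B (the rewrite author's own statement) =====
-- stated objective: alternative
-- what changed: Replaced A's running in_function/current-counter state machine by an index-first scan: collect all boundary lines (def lines, or nonempty unindented lines) once with their indices, then check the gap between each def boundary and the next boundary against the limit.
import Mathlib
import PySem

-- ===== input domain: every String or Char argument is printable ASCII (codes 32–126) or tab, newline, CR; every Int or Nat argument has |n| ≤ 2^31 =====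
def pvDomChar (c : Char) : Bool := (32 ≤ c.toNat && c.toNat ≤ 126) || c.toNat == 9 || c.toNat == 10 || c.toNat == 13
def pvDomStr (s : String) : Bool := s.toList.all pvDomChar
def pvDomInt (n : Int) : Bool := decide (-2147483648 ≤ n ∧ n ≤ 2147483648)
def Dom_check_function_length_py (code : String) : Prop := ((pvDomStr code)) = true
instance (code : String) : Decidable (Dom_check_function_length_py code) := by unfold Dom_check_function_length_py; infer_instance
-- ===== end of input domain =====

-- B replaces A's running in_function/counter state machine by a single boundary-index
-- scan: collect all boundary lines once, then check consecutive-boundary gaps (objective: alternative).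

-- ===== PORT A =====
-- line.strip().startswith('def ')
def pvIsDef (line : String) : Bool := PySem.Str.startswith (PySem.Str.strip line) "def "
-- line.strip() and not line.startswith(' ')   (Python truthiness of the stripped string)
def pvIsTop (line : String) : Bool := (PySem.Str.strip line != "") && !(PySem.Str.startswith line " ")

-- the body of A's for-loop, state = (function_lines, current_function_lines, in_function)
def pvStepA (st : List Int × Int × Bool) (line : String) : List Int × Int × Bool :=
  if pvIsDef line then
    ((if st.2.2 && decide (0 < st.2.1) then st.1 ++ [st.2.1] else st.1), 1, true)
  else if st.2.2 then
    if pvIsTop line then (st.1 ++ [st.2.1], 0, false)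
    else (st.1, st.2.1 + 1, true)
  else st

def check_function_length_py (code : String) : Bool :=
  let lines := (PySem.Str.split? code "\n").getD []
  let st := lines.foldl pvStepA ([], 0, false)
  st.1.all (fun n => decide (n ≤ 60))

-- ===== PORT B =====
-- loop body of B: append (i, d) when the line is a boundary
def pvStepB (acc : List (Int × Bool)) (p : Int × String) : List (Int × Bool) :=
  let d := pvIsDef p.2
  if d || pvIsTop p.2 then acc ++ [(p.1, d)] else acc

def check_function_length_py_alt (code : String) : Bool :=
  let lines := (PySem.Str.split? code "\n").getD []
  let bs := (PySem.List.enumerate lines).foldl pvStepB []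
  (bs.zip bs.tail).all (fun q => !q.1.2 || decide (q.2.1 - q.1.1 ≤ 60))

-- ===== PRECONDITION & SPEC =====
def Spec_check_function_length_py (code : String) (out : Bool) : Prop := out = check_function_length_py_alt code
instance (code : String) (out : Bool) : Decidable (Spec_check_function_length_py code out) := by unfold Spec_check_function_length_py; infer_instance

-- ===== CLAIM (what is proved, stated in full; the proofs are below) =====
def Claim_equal_check_function_length_py : Prop := ∀ (code : String), Dom_check_function_length_py code → Spec_check_function_length_py code (check_function_length_py code)

-- ===== LEMMAS AND PROOFS =====

-- common spec: online conjunction; the Option carries the running length of the open def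
def pvGo : List String → Option Int → Bool
  | [], _ => true
  | l :: ls, st =>
    if pvIsDef l || pvIsTop l then
      (match st with | some c => decide (c ≤ 60) | none => true) &&
      pvGo ls (if pvIsDef l then some 1 else none)
    else pvGo ls (Option.map (· + 1) st)

-- boundary list of the suffix, first index k
def pvBsF : Int → List String → List (Int × Bool)
  | _, [] => []
  | k, l :: ls => (if pvIsDef l || pvIsTop l then [(k, pvIsDef l)] else []) ++ pvBsF (k+1) ls

-- consecutive-pair check with a pending previous boundary
def pvZ : Option (Int × Bool) → List (Int × Bool) → Bool
  | _, [] => true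
  | prev, q :: rest =>
    (match prev with
     | some p => !p.2 || decide (q.1 - p.1 ≤ 60)
     | none => true) && pvZ (some q) rest

theorem pv_lemA : ∀ (ls : List String) (fls : List Int) (cur : Int) (inf : Bool),
    (inf = true → 1 ≤ cur) →
    ((ls.foldl pvStepA (fls, cur, inf)).1.all (fun n => decide (n ≤ 60)))
      = (fls.all (fun n => decide (n ≤ 60)) && pvGo ls (if inf then some cur else none)) := by
  intro ls
  induction ls with
  | nil => intro fls cur inf h; simp [pvGo]
  | cons l ls ih =>
    intro fls cur inf h
    simp only [List.foldl_cons]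
    by_cases hd : pvIsDef l = true
    · cases inf with
      | true =>
        have hc : (0 : Int) < cur := by have := h rfl; omega
        simp [pvStepA, pvGo, hd, hc, ih, Bool.and_assoc]
      | false =>
        simp [pvStepA, pvGo, hd, ih]
    · by_cases ht : pvIsTop l = true
      · cases inf with
        | true => simp [pvStepA, pvGo, hd, ht, ih, Bool.and_assoc]
        | false => simp [pvStepA, pvGo, hd, ht, ih]
      · cases inf with
        | true =>
          have : (1:Int) ≤ cur + 1 := by have := h rfl; omega
          rw [show pvStepA (fls, cur, true) l = (fls, cur + 1, true) by
            simp [pvStepA, hd, ht]]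
          simp [pvGo, hd, ht, ih _ _ _ (fun _ => this)]
        | false =>
          rw [show pvStepA (fls, cur, false) l = (fls, cur, false) by simp [pvStepA, hd]]
          simp [pvGo, hd, ht, ih]

theorem pv_lemEnum : ∀ (ls : List String) (k : Int) (acc : List (Int × Bool)),
    (PySem.List.enumerate ls k).foldl pvStepB acc = acc ++ pvBsF k ls := by
  intro ls
  induction ls with
  | nil => intro k acc; simp [PySem.List.enumerate_nil, pvBsF]
  | cons l ls ih =>
    intro k acc
    rw [PySem.List.enumerate_cons, List.foldl_cons, ih]
    by_cases hb : (pvIsDef l || pvIsTop l) = true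
    · simp [pvStepB, pvBsF, hb]
    · simp only [Bool.or_eq_true, not_or] at hb
      simp [pvStepB, pvBsF, hb.1, hb.2]

theorem pv_lemZip : ∀ (bs : List (Int × Bool)) (p : Int × Bool),
    ((p :: bs).zip bs).all (fun q => !q.1.2 || decide (q.2.1 - q.1.1 ≤ 60)) = pvZ (some p) bs := by
  intro bs
  induction bs with
  | nil => intro p; simp [pvZ]
  | cons q rest ih =>
    intro p
    rw [List.zip_cons_cons, List.all_cons, ih q]
    rfl

theorem pv_lemZtop (bs : List (Int × Bool)) :
    (bs.zip bs.tail).all (fun q => !q.1.2 || decide (q.2.1 - q.1.1 ≤ 60)) = pvZ none bs := by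
  cases bs with
  | nil => simp [pvZ]
  | cons p rest =>
    rw [List.tail_cons]
    rw [pv_lemZip rest p]
    simp [pvZ]

theorem pv_lemBF : ∀ (ls : List String) (k : Int) (prev : Option (Int × Bool)),
    pvZ prev (pvBsF k ls)
      = pvGo ls (match prev with | some (i, true) => some (k - i) | _ => none) := by
  intro ls
  induction ls with
  | nil =>
    intro k prev
    cases prev with
    | none => simp [pvBsF, pvZ, pvGo]
    | some p => cases p with | mk i d => cases d <;> simp [pvBsF, pvZ, pvGo]
  | cons l ls ih =>
    intro k prev
    by_cases hb : (pvIsDef l || pvIsTop l) = true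
    · rw [show pvBsF k (l :: ls) = (k, pvIsDef l) :: pvBsF (k+1) ls by simp [pvBsF, hb]]
      have hrec : pvZ (some (k, pvIsDef l)) (pvBsF (k+1) ls)
          = pvGo ls (if pvIsDef l then some 1 else none) := by
        rw [ih]
        by_cases hd : pvIsDef l = true
        · simp [hd]
        · simp [hd]
      cases prev with
      | none => simp [pvZ, pvGo, hb, hrec]
      | some p =>
        cases p with
        | mk i d =>
          cases d with
          | false => simp [pvZ, pvGo, hb, hrec]
          | true => simp [pvZ, pvGo, hb, hrec]
    · rw [show pvBsF k (l :: ls) = pvBsF (k+1) ls by simp [pvBsF, hb]]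
      rw [ih]
      simp only [Bool.or_eq_true, not_or] at hb
      cases prev with
      | none => simp [pvGo, hb.1, hb.2]
      | some p =>
        cases p with
        | mk i d =>
          cases d with
          | false => simp [pvGo, hb.1, hb.2]
          | true =>
            show pvGo ls (some (k + 1 - i)) = pvGo (l :: ls) (some (k - i))
            rw [show k + 1 - i = k - i + 1 by ring]
            simp [pvGo, hb.1, hb.2]

-- ===== VERDICT (by name: the statement is the Claim_ definition above) =====
theorem check_function_length_py_spec : Claim_equal_check_function_length_py := by
  intro code _
  show check_function_length_py code = check_function_length_py_alt code
  show ((((PySem.Str.split? code "\n").getD []).foldl pvStepA ([], 0, false)).1.all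
      (fun n => decide (n ≤ 60)))
    = (let bs := (PySem.List.enumerate ((PySem.Str.split? code "\n").getD [])).foldl pvStepB [];
       (bs.zip bs.tail).all (fun q => !q.1.2 || decide (q.2.1 - q.1.1 ≤ 60)))
  rw [pv_lemA _ [] 0 false (by simp), pv_lemEnum _ 0 [], List.nil_append, pv_lemZtop, pv_lemBF]
  simp
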